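-- pv_equiv track=rewrite | github.com/Xitog/tal | corpus.py | segment_string
-- ===== SOURCE A (Python) =====
-- def segment_string(string):
--     """
--         Used in constructor Title.
--     """
--     words = []
--     start = 0
--     end = 0
--     length = 0
--     for c in string:
--         if start == end: # we are not in a word
--             if c.isspace() or c in ["“", '"', "'", '’', '.', '«', '»', '°', '(', ')', '/', '\\', ':', '[', ']', ',', '•', '″', '…', '„', '‘']:
--                 start += 1
--                 end += 1
--             else:
--                 end += 1
--         else: # we are in a word
--             if c.isspace() or c in ["“", '"', "'", '’', '.', '«', '»', '°', '(', ')', '/', '\\', ':', '[', ']', ',', '•', '″', '…', '„', '‘']: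
--                 words.append((start, end))
--                 start = end + 1
--                 end = start
--             else:
--                 end += 1
--     if start != end:
--         words.append((start, end))
--     return words
-- ===== SOURCE B (Python) =====
-- def segment_string(string):
--     """
--         Used in constructor Title.
--     """
--     seps = set('\u201c"\'\u2019.\u00ab\u00bb\u00b0()/\\:[],\u2022\u2033\u2026\u201e\u2018')
--     flags = [not (c.isspace() or c in seps) for c in string]
--     n = len(flags)
--     starts = [i for i in range(n) if flags[i] and (i == 0 or not flags[i - 1])]
--     ends = [i + 1 for i in range(n) if flags[i] and (i == n - 1 or not flags[i + 1])]
--     return list(zip(starts, ends))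
-- ===== Notes on version B (the rewrite author's own statement) =====
-- stated objective: alternative
-- what changed: A's single-pass start/end state machine is replaced by computing a word/separator flag per character and then collecting run starts and run ends with two index comprehensions zipped together.
import Mathlib
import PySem

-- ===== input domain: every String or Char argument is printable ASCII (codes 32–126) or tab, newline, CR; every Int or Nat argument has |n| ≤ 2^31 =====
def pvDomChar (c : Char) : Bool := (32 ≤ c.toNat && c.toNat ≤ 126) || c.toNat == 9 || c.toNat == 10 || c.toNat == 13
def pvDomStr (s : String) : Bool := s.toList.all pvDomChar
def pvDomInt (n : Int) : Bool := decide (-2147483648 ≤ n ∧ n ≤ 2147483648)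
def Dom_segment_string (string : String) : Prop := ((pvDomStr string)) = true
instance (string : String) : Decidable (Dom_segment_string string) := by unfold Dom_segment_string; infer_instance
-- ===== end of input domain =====

-- B replaces A's explicit start/end state machine by a flags-then-boundary-comprehensions decomposition (same cost, different structure).

-- ===== PORT A =====
-- the separator test 'c.isspace() or c in [...]', shared verbatim by both Pythons
def pySep (c : Char) : Bool :=
  PySem.Chars.isspace c ||
    (['“', '"', '\'', '’', '.', '«', '»', '°', '(', ')', '/', '\\', ':', '[', ']', ',', '•', '″', '…', '„', '‘'].contains c)

-- one iteration of A's for-loop: state = (words, start, end)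
def segStep (st : List (Int × Int) × Nat × Nat) (c : Char) : List (Int × Int) × Nat × Nat :=
  let (words, start, stop) := st
  if start = stop then
    if pySep c then (words, start + 1, stop + 1) else (words, start, stop + 1)
  else
    if pySep c then (words ++ [((start : Int), (stop : Int))], stop + 1, stop + 1)
    else (words, start, stop + 1)

def segment_string (string : String) : List (Int × Int) :=
  let r := string.toList.foldl segStep ([], 0, 0)
  if r.2.1 ≠ r.2.2 then r.1 ++ [((r.2.1 : Int), (r.2.2 : Int))] else r.1

-- ===== PORT B =====
def segment_string_alt (string : String) : List (Int × Int) :=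
  let flags := string.toList.map (fun c => !(pySep c))
  let n := flags.length
  let starts : List Nat := (List.range n).filter (fun i => flags[i]! && (i == 0 || !flags[i - 1]!))
  let ends : List Nat := ((List.range n).filter (fun i => flags[i]! && (i == n - 1 || !flags[i + 1]!))).map (fun i => i + 1)
  (starts.zip ends).map (fun p => ((p.1 : Int), (p.2 : Int)))

-- ===== PRECONDITION & SPEC =====
def Spec_segment_string (string : String) (out : List (Int × Int)) : Prop := out = segment_string_alt string
instance (string : String) (out : List (Int × Int)) : Decidable (Spec_segment_string string out) := by unfold Spec_segment_string; infer_instance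

-- ===== CLAIM (what is proved, stated in full; the proofs are below) =====
def Claim_equal_segment_string : Prop := ∀ (string : String), Dom_segment_string string → Spec_segment_string string (segment_string string)

-- ===== LEMMAS AND PROOFS =====

-- common specification: maximal runs of word characters, emitted as Nat spans
def goN : List Bool → Nat → Nat → List (Nat × Nat)
  | [], s, e => if s ≠ e then [(s, e)] else []
  | b :: t, s, e =>
    if s = e then goN t (if b then s else s + 1) (e + 1)
    else if b then goN t s (e + 1) else (s, e) :: goN t (e + 1) (e + 1)

def castPair (p : Nat × Nat) : Int × Int := ((p.1 : Int), (p.2 : Int))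

def finishA (r : List (Int × Int) × Nat × Nat) : List (Int × Int) :=
  if r.2.1 ≠ r.2.2 then r.1 ++ [((r.2.1 : Int), (r.2.2 : Int))] else r.1

def startsAux : List Bool → Bool → List Nat
  | [], _ => []
  | b :: t, prev => (if b && !prev then [0] else []) ++ (startsAux t b).map (· + 1)

def endsAux : List Bool → Bool → List Nat
  | [], prev => if prev then [0] else []
  | b :: t, prev => (if prev && !b then [0] else []) ++ (endsAux t b).map (· + 1)

theorem A_fold (cs : List Char) : ∀ (w : List (Int × Int)) (s e : Nat),
    finishA (cs.foldl segStep (w, s, e)) = w ++ (goN (cs.map (fun c => !(pySep c))) s e).map castPair := by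
  induction cs with
  | nil =>
    intro w s e
    simp only [List.foldl_nil, List.map_nil, goN, finishA]
    split_ifs with h <;> simp [castPair]
  | cons c cs ih =>
    intro w s e
    simp only [List.foldl_cons, List.map_cons, goN, segStep]
    by_cases hse : s = e
    · by_cases hc : pySep c = true
      · simp [hse, hc, ih]
      · simp [hse, hc, ih]
    · by_cases hc : pySep c = true
      · simp [hse, hc, ih, castPair]
      · simp [hse, hc, ih]

theorem S1 (t : List Bool) : ∀ (prev : Bool),
    (List.range t.length).filter (fun i => t[i]! && (if i = 0 then !prev else !t[i - 1]!)) = startsAux t prev := by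
  induction t with
  | nil => intro prev; simp [startsAux]
  | cons b u ih =>
    intro prev
    rw [List.length_cons, List.range_succ_eq_map, List.filter_cons, List.filter_map]
    have hcong : (List.range u.length).filter
        ((fun i => (b :: u)[i]! && (if i = 0 then !prev else !(b :: u)[i - 1]!)) ∘ Nat.succ)
        = (List.range u.length).filter (fun i => u[i]! && (if i = 0 then !b else !u[i - 1]!)) := by
      apply List.filter_congr
      intro i _
      cases i with
      | zero => simp
      | succ j => simp
    rw [hcong, ih]
    simp only [startsAux]
    cases b <;> cases prev <;> simp

theorem E1 (u : List Bool) : ∀ (b : Bool),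
    endsAux u b = (if b && !(u.headD false) then [0] else []) ++
      ((List.range u.length).filter (fun i => u[i]! && (i == u.length - 1 || !u[i + 1]!))).map (· + 1) := by
  induction u with
  | nil => intro b; cases b <;> simp [endsAux]
  | cons c v ih =>
    intro b
    rw [List.length_cons, List.range_succ_eq_map, List.filter_cons, List.filter_map]
    have hcong : (List.range v.length).filter
        ((fun i => (c :: v)[i]! && (i == v.length + 1 - 1 || !(c :: v)[i + 1]!)) ∘ Nat.succ)
        = (List.range v.length).filter (fun i => v[i]! && (i == v.length - 1 || !v[i + 1]!)) := by
      apply List.filter_congr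
      intro i hi
      have hlt : i < v.length := List.mem_range.mp hi
      have hb : (i + 1 == v.length) = (i == v.length - 1) := by
        rw [Bool.eq_iff_iff]; simp; omega
      simp [Function.comp, hb]
    have hhead : ((c :: v)[0]! && (0 == v.length + 1 - 1 || !(c :: v)[0 + 1]!))
        = (c && !(v.headD false)) := by
      cases v with
      | nil => simp
      | cons x w => simp
    rw [hhead, hcong]
    simp only [endsAux, ih c]
    cases b <;> cases c <;> cases hv : v.headD false <;>
      simp [List.map_map, Function.comp, Nat.succ_eq_add_one]

theorem Zmain (f : List Bool) : ∀ (prev : Bool) (s e : Nat), (prev = false → s = e) → (prev = true → s < e) →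
    ((if prev then [s] else []) ++ (startsAux f prev).map (· + e)).zip ((endsAux f prev).map (· + e)) = goN f s e := by
  induction f with
  | nil =>
    intro prev s e h0 h1
    cases prev
    · simp [startsAux, endsAux, goN, h0 rfl]
    · simp [startsAux, endsAux, goN, Nat.ne_of_lt (h1 rfl)]
  | cons b t ih =>
    intro prev s e h0 h1
    have hmap : ∀ (l : List Nat), (l.map (fun x => x + 1)).map (fun x => x + e) = l.map (fun x => x + (e + 1)) := by
      intro l; rw [List.map_map]; apply List.map_congr_left; intro x _; simp [Function.comp]; omega
    cases prev with
    | false =>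
      have hse := h0 rfl; subst hse
      cases b
      · simpa [startsAux, endsAux, goN, hmap] using
          ih false (s + 1) (s + 1) (fun _ => rfl) (fun h => by simp at h)
      · simpa [startsAux, endsAux, goN, hmap] using
          ih true s (s + 1) (fun h => by simp at h) (fun _ => Nat.lt_succ_self s)
    | true =>
      have hlt := h1 rfl
      have hne : ¬ s = e := Nat.ne_of_lt hlt
      cases b
      · have hclose := ih false (e + 1) (e + 1) (fun _ => rfl) (fun h => by simp at h)
        simp only [if_neg (Bool.false_ne_true), List.nil_append] at hclose
        simp [startsAux, endsAux, goN, hmap, hne, hclose]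
      · simpa [startsAux, endsAux, goN, hmap, hne] using
          ih true s (e + 1) (fun h => by simp at h) (fun _ => Nat.lt_succ_of_lt hlt)

-- ===== VERDICT (by name: the statement is the Claim_ definition above) =====
theorem segment_string_spec : Claim_equal_segment_string := by
  intro string _
  unfold Spec_segment_string
  show finishA (string.toList.foldl segStep ([], 0, 0)) = segment_string_alt string
  rw [A_fold, List.nil_append]
  have hs : (List.range (string.toList.map (fun c => !(pySep c))).length).filter
      (fun i => (string.toList.map (fun c => !(pySep c)))[i]! &&
        (i == 0 || !(string.toList.map (fun c => !(pySep c)))[i - 1]!))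
      = startsAux (string.toList.map (fun c => !(pySep c))) false := by
    rw [← S1 (string.toList.map (fun c => !(pySep c))) false]
    apply List.filter_congr
    intro i _
    cases i <;> simp
  have he : ((List.range (string.toList.map (fun c => !(pySep c))).length).filter
      (fun i => (string.toList.map (fun c => !(pySep c)))[i]! &&
        (i == (string.toList.map (fun c => !(pySep c))).length - 1 ||
          !(string.toList.map (fun c => !(pySep c)))[i + 1]!))).map (fun i => i + 1)
      = endsAux (string.toList.map (fun c => !(pySep c))) false := by
    rw [E1 (string.toList.map (fun c => !(pySep c))) false]
    simp
  have hz := Zmain (string.toList.map (fun c => !(pySep c))) false 0 0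
    (fun _ => rfl) (fun h => by simp at h)
  simp only [if_neg (Bool.false_ne_true), List.nil_append, Nat.add_zero,
    List.map_id'] at hz
  unfold segment_string_alt
  simp only [hs, he]
  rw [← hz]
  simp [castPair]
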